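-- pv_equiv track=rewrite | github.com/whattSUPkim/python-data-structure-and-algorithm | Practice/Programmers/Lv2-택배상자.py | solution
-- ===== SOURCE A (Python) =====
-- from collections import deque
--
-- def solution(order):
--     answer = 0
--     container = deque([i for i in range(1, len(order) + 1)])
--     sub_container = []
--     for o in order:
--         while True:
--             if sub_container and sub_container[-1] == o:
--                 sub_container.pop()
--                 answer += 1
--                 break
--             if container:
--                 box = container.popleft()
--                 if box == o:
--                     answer += 1
--                     break
--                 else:
--                     sub_container.append(box)
--                     continue
--             return answer
--
--     return answer
-- ===== SOURCE B (Python) =====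
-- def solution(order):
--     # No stack: boxes popped so far are marked in `popped`; after processing a
--     # prefix, the belt has delivered boxes 1..m and the pile's top is exactly
--     # the largest not-yet-popped box <= m.  Box o is loadable iff it is fresh
--     # above m, or it equals that largest unpopped value.
--     n = len(order)
--     popped = [False] * (n + 1)
--     m = 0
--     answer = 0
--     for o in order:
--         if not (1 <= o <= n):
--             break
--         if o > m:
--             m = o
--         else:
--             x = m
--             while x >= 1 and popped[x]:
--                 x -= 1
--             if x != o:
--                 break
--         popped[o] = True
--         answer += 1
--     return answer
-- ===== Notes on version B (the rewrite author's own statement) =====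
-- stated objective: alternative
-- what changed: Replaces A's explicit simulation (a deque of undelivered boxes plus a stack of set-aside boxes) by a value-based characterisation: a boolean table of already-loaded boxes and the maximum delivered box m; box o is loadable iff it is fresh (m < o <= n) or it equals the largest not-yet-loaded value <= m, so no container is ever built or moved.
import Mathlib
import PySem

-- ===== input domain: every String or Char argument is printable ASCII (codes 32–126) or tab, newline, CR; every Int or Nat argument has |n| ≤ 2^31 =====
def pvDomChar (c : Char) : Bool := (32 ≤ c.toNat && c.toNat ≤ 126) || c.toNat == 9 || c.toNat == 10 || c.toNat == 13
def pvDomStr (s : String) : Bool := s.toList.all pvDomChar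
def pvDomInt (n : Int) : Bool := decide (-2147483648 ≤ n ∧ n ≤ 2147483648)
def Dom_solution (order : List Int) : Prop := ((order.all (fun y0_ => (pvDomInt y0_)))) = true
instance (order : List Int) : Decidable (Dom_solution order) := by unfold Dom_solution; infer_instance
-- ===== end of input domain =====

-- B drops A's stack-and-deque simulation entirely: it marks popped boxes in a boolean
-- table and characterises the pile's top values arithmetically (objective: alternative).

-- ===== PORT A =====
-- A's inner `while True` loop; the stack sub_container is stored top-first (Python
-- appends/pops at the end, here at the head). `none` models A's early `return answer`.
def innerA : List Int → List Int → Int → Int → Option (List Int × List Int × Int)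
  | cont, sub, o, ans =>
    if sub.head? = some o then some (cont, sub.tail, ans + 1)
    else
      match cont with
      | box :: rest =>
          if box = o then some (rest, sub, ans + 1)
          else innerA rest (box :: sub) o ans
      | [] => none
termination_by cont _ _ _ => cont.length

-- A's `for o in order` loop threading (container, sub_container, answer).
def outerA : List Int → List Int → List Int → Int → Int
  | [], _, _, ans => ans
  | o :: os, cont, sub, ans =>
    match innerA cont sub o ans with
    | some (c, s, a) => outerA os c s a
    | none => ans

def solution (order : List Int) : Int :=
  outerA order (PySem.List.pyRange 1 ((order.length : Int) + 1) 1) [] 0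

-- ===== PORT B =====
-- B's `while x >= 1 and popped[x]: x -= 1` scan (the largest unpopped value ≤ x).
def findB (popped : List Bool) (x : Int) : Int :=
  if h : 1 ≤ x ∧ PySem.List.pyGet? popped x = some true then findB popped (x - 1) else x
termination_by x.toNat
decreasing_by omega

-- B's `for o in order` loop threading (popped table, m = max delivered, answer).
def loopB : List Int → List Bool → Int → Int → Int → Int
  | [], _, _, _, ans => ans
  | o :: os, popped, m, n, ans =>
    if 1 ≤ o ∧ o ≤ n then
      if m < o then loopB os (popped.set o.toNat true) o n (ans + 1)
      else if findB popped m = o then loopB os (popped.set o.toNat true) m n (ans + 1)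
      else ans
    else ans

def solution_alt (order : List Int) : Int :=
  loopB order (List.replicate (order.length + 1) false) 0 (order.length : Int) 0

-- ===== PRECONDITION & SPEC =====
def Spec_solution (order : List Int) (out : Int) : Prop := out = solution_alt order
instance (order : List Int) (out : Int) : Decidable (Spec_solution order out) := by unfold Spec_solution; infer_instance

-- ===== CLAIM (what is proved, stated in full; the proofs are below) =====
def Claim_equal_solution : Prop := ∀ (order : List Int), Dom_solution order → Spec_solution order (solution order)

-- ===== LEMMAS AND PROOFS =====

-- The contents of A's stack when the popped boxes ≤ m are exactly those marked in
-- `popped`: the unpopped values of 1..m, largest first.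
def descL (popped : List Bool) : Nat → List Int
  | 0 => []
  | m + 1 => if popped[m + 1]? = some true then descL popped m else ((m : Int) + 1) :: descL popped m

theorem findB_descL (popped : List Bool) : ∀ m : Nat, findB popped (m : Int) = (descL popped m).headD 0 := by
  intro m
  induction m with
  | zero => rw [findB]; simp [descL]
  | succ m ih =>
    rw [findB, descL]
    by_cases hp : popped[m + 1]? = some true
    · rw [dif_pos ⟨by exact_mod_cast Nat.succ_le_succ (Nat.zero_le m), by
        rw [PySem.List.pyGet?_natCast]; exact hp⟩]
      rw [if_pos hp, show ((m + 1 : Nat) : Int) - 1 = (m : Int) by push_cast; ring]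
      exact ih
    · rw [dif_neg (by rw [PySem.List.pyGet?_natCast]; exact fun h => hp h.2), if_neg hp]
      simp only [List.headD_cons]; push_cast; ring

theorem descL_mem (popped : List Bool) : ∀ (m : Nat) (x : Int), x ∈ descL popped m → 1 ≤ x ∧ x ≤ (m : Int) := by
  intro m
  induction m with
  | zero => intro x hx; simp [descL] at hx
  | succ m ih =>
    intro x hx
    rw [descL] at hx
    by_cases hp : popped[m + 1]? = some true
    · rw [if_pos hp] at hx
      have := ih x hx; push_cast; omega
    · rw [if_neg hp] at hx
      rcases List.mem_cons.mp hx with h | h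
      · subst h; push_cast; omega
      · have := ih x h; push_cast; omega

theorem descL_congr (popped popped' : List Bool) : ∀ m : Nat,
    (∀ j : Nat, 1 ≤ j → j ≤ m → popped[j]? = popped'[j]?) → descL popped m = descL popped' m := by
  intro m
  induction m with
  | zero => intro _; rfl
  | succ m ih =>
    intro h
    rw [descL, descL, h (m + 1) (Nat.succ_le_succ (Nat.zero_le m)) le_rfl,
      ih fun j h1 h2 => h j h1 (Nat.le_succ_of_le h2)]

theorem descL_drop_true (popped : List Bool) : ∀ (m k : Nat), k ≤ m →
    (∀ j : Nat, k < j → j ≤ m → popped[j]? = some true) → descL popped m = descL popped k := by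
  intro m
  induction m with
  | zero => intro k hk _; interval_cases k; rfl
  | succ m ih =>
    intro k hk h
    rcases Nat.eq_or_lt_of_le hk with he | hl
    · rw [he]
    · rw [descL, if_pos (h (m + 1) hl le_rfl)]
      exact ih k (Nat.lt_succ_iff.mp hl) fun j h1 h2 => h j h1 (Nat.le_succ_of_le h2)

-- Structure of a nonempty stack: its top is k+1, the values k+2..m are all popped,
-- and the rest of the stack is the stack for bound k.
theorem descL_head (popped : List Bool) : ∀ (m : Nat) (x : Int) (t : List Int),
    descL popped m = x :: t →
    ∃ k : Nat, x = (k : Int) + 1 ∧ k + 1 ≤ m ∧ t = descL popped k ∧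
      (∀ j : Nat, k + 1 < j → j ≤ m → popped[j]? = some true) := by
  intro m
  induction m with
  | zero => intro x t h; simp [descL] at h
  | succ m ih =>
    intro x t h
    rw [descL] at h
    by_cases hp : popped[m + 1]? = some true
    · rw [if_pos hp] at h
      obtain ⟨k, h1, h2, h3, h4⟩ := ih x t h
      exact ⟨k, h1, Nat.le_succ_of_le h2, h3, fun j hj1 hj2 => by
        rcases Nat.eq_or_lt_of_le hj2 with he | hl
        · rw [he]; exact hp
        · exact h4 j hj1 (Nat.lt_succ_iff.mp hl)⟩
    · rw [if_neg hp] at h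
      obtain ⟨hx, ht⟩ := List.cons.injEq .. ▸ h
      exact ⟨m, hx.symm ▸ rfl, le_rfl, ht.symm ▸ rfl, fun j hj1 hj2 => by omega⟩

-- A's inner loop over the remaining belt k..n: it succeeds iff the wanted box is
-- still on the belt, pushing the skipped boxes (largest first) onto the stack.
theorem innerA_range (n o ans : Int) : ∀ (k : Int) (sub : List Int), sub.head? ≠ some o →
    innerA (PySem.List.pyRange k (n + 1) 1) sub o ans =
      if k ≤ o ∧ o ≤ n then
        some (PySem.List.pyRange (o + 1) (n + 1) 1, (PySem.List.pyRange k o 1).reverse ++ sub, ans + 1)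
      else none := by
  intro k sub hh
  by_cases hk : k ≤ n
  · rw [PySem.List.pyRange_one_cons (by omega), innerA.eq_def]
    simp only [if_neg hh]
    by_cases hb : k = o
    · rw [if_pos hb, if_pos ⟨le_of_eq hb, hb ▸ hk⟩, hb,
        PySem.List.pyRange_one_eq_nil (le_refl o)]
      simp
    · rw [if_neg hb,
        innerA_range n o ans (k + 1) (k :: sub) (by simp [hb])]
      by_cases hko : k + 1 ≤ o ∧ o ≤ n
      · rw [if_pos hko, if_pos ⟨by omega, hko.2⟩,
          PySem.List.pyRange_one_cons (by omega : k < o)]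
        simp
      · rw [if_neg hko, if_neg (by omega)]
  · rw [PySem.List.pyRange_one_eq_nil (by omega), innerA.eq_def]
    simp only [if_neg hh]
    rw [if_neg (by omega)]
termination_by k _ _ => (n + 1 - k).toNat
decreasing_by omega

-- The coupling invariant between A's state and B's state.
def InvAB (n : Nat) (popped : List Bool) (m : Nat) (sub : List Int) : Prop :=
  popped.length = n + 1 ∧ m ≤ n ∧ sub = descL popped m ∧
    ∀ j : Nat, m < j → j ≤ n → popped[j]? = some false

-- Pushing the fresh boxes m+1..o-1 and popping o: the new stack for bound o is the
-- skipped boxes (largest first) in front of the old stack.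
theorem descL_fresh (popped : List Bool) (n m : Nat) (o : Int)
    (_hlen : popped.length = n + 1) (hmo : (m : Int) < o) (hon : o ≤ (n : Int))
    (hhigh : ∀ j : Nat, m < j → j ≤ n → popped[j]? = some false) :
    ∀ j : Nat, m ≤ j → (j : Int) < o →
      descL (popped.set o.toNat true) j = (PySem.List.pyRange ((m : Int) + 1) ((j : Int) + 1) 1).reverse ++ descL popped m := by
  intro j
  induction j with
  | zero =>
    intro hmj _
    interval_cases m
    rw [PySem.List.pyRange_one_eq_nil (by omega)]
    simp [descL]
  | succ j ih =>
    intro hmj hjo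
    rcases Nat.eq_or_lt_of_le hmj with he | hl
    · rw [← he, PySem.List.pyRange_one_eq_nil (by omega), List.reverse_nil, List.nil_append]
      exact descL_congr _ _ m fun i h1 h2 =>
        List.getElem?_set_ne (by omega)
    · have hj : m ≤ j := Nat.lt_succ_iff.mp hl
      have hjo' : (j : Int) + 1 < o := by push_cast at hjo; exact hjo
      have hjn : j + 1 ≤ n := by omega
      have hne : o.toNat ≠ j + 1 := by omega
      rw [descL, if_neg (by rw [List.getElem?_set_ne hne, hhigh (j + 1) hl hjn]; simp),
        show ((j + 1 : Nat) : Int) + 1 = ((j : Int) + 1) + 1 by push_cast; ring,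
        PySem.List.pyRange_one_succ_right (show (m : Int) + 1 ≤ (j : Int) + 1 by omega),
        List.reverse_append, ih hj (by omega)]
      simp

-- One step of the two programs, and the whole runs, agree under the invariant.
theorem main_eq (os : List Int) : ∀ (n : Nat) (popped : List Bool) (m : Nat) (sub : List Int) (ans : Int),
    InvAB n popped m sub →
    outerA os (PySem.List.pyRange ((m : Int) + 1) ((n : Int) + 1) 1) sub ans =
      loopB os popped (m : Int) (n : Int) ans := by
  induction os with
  | nil => intro n popped m sub ans _; rfl
  | cons o os ih =>
    intro n popped m sub ans hinv
    obtain ⟨hlen, hmn, hsub, hhigh⟩ := hinv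
    have hmem : ∀ x ∈ sub, 1 ≤ x ∧ x ≤ (m : Int) := fun x hx =>
      descL_mem popped m x (hsub ▸ hx)
    rw [outerA, loopB]
    by_cases hg : 1 ≤ o ∧ o ≤ (n : Int)
    · rw [if_pos hg]
      by_cases hm : (m : Int) < o
      · -- fresh box: o > m
        have hh : sub.head? ≠ some o := by
          intro h
          have := hmem o (List.mem_of_mem_head? h)
          omega
        rw [if_pos hm, innerA_range n o ans ((m : Int) + 1) sub hh,
          if_pos ⟨by omega, hg.2⟩]
        have hto : ((o.toNat : Nat) : Int) = o := Int.toNat_of_nonneg (by omega)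
        have hset : descL (popped.set o.toNat true) o.toNat =
            (PySem.List.pyRange ((m : Int) + 1) o 1).reverse ++ descL popped m := by
          obtain ⟨p, hp⟩ : ∃ p, o.toNat = p + 1 := ⟨o.toNat - 1, by omega⟩
          have hf2 := descL_fresh popped n m o hlen hm hg.2 hhigh p (by omega) (by omega)
          rw [hp] at hf2 ⊢
          rw [descL, List.getElem?_set_self (by omega), if_pos rfl, hf2,
            show (p : Int) + 1 = o by omega]
        have := ih n (popped.set o.toNat true) o.toNat
          ((PySem.List.pyRange ((m : Int) + 1) o 1).reverse ++ sub) (ans + 1)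
          ⟨by rw [List.length_set, hlen], by omega, by rw [hset, hsub],
           fun j h1 h2 => by
             rw [List.getElem?_set_ne (by omega)]
             exact hhigh j (by omega) h2⟩
        rw [hto] at this
        exact this
      · rw [if_neg hm]
        by_cases hf : findB popped (m : Int) = o
        · -- o is the top of the stack
          rw [if_pos hf]
          have hd : descL popped m = o :: (descL popped m).tail := by
            cases hds : descL popped m with
            | nil => rw [findB_descL, hds] at hf; simp at hf; omega
            | cons x t => rw [findB_descL, hds] at hf; simp [← hf]
          obtain ⟨k, hk1, hk2, hk3, hk4⟩ := descL_head popped m o (descL popped m).tail hd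
          have hkt : o.toNat = k + 1 := by omega
          have hh : sub.head? = some o := by rw [hsub, hd]; rfl
          rw [innerA.eq_def]
          simp only [if_pos hh]
          have hset : descL (popped.set o.toNat true) m = (descL popped m).tail := by
            rw [hkt, descL_drop_true (popped.set (k + 1) true) m (k + 1) hk2
                (fun j h1 h2 => by
                  rw [List.getElem?_set_ne (by omega)]; exact hk4 j h1 h2),
              descL, List.getElem?_set_self (by omega), if_pos rfl, hk3]
            exact descL_congr _ _ k fun j h1 h2 => List.getElem?_set_ne (by omega)
          exact ih n (popped.set o.toNat true) m sub.tail (ans + 1)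
            ⟨by rw [List.length_set, hlen], hmn, by rw [hset, hsub],
             fun j h1 h2 => by
               rw [List.getElem?_set_ne (by omega)]
               exact hhigh j h1 h2⟩
        · -- o neither fresh nor the top: both programs stop
          have hh : sub.head? ≠ some o := by
            intro h
            cases hds : descL popped m with
            | nil => rw [hsub, hds] at h; simp at h
            | cons x t =>
              rw [hsub, hds] at h
              rw [findB_descL, hds] at hf
              simp at h hf
              exact hf (h ▸ rfl)
          rw [if_neg hf, innerA_range n o ans ((m : Int) + 1) sub hh, if_neg (by omega)]
    · -- box o does not exist: both programs stop
      have hh : sub.head? ≠ some o := by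
        intro h
        have := hmem o (List.mem_of_mem_head? h)
        omega
      rw [if_neg hg, innerA_range n o ans ((m : Int) + 1) sub hh, if_neg (by omega)]

-- ===== VERDICT (by name: the statement is the Claim_ definition above) =====
theorem solution_spec : Claim_equal_solution := by
  intro order _
  unfold Spec_solution solution solution_alt
  have := main_eq order order.length (List.replicate (order.length + 1) false) 0 [] 0
    ⟨by simp, Nat.zero_le _, rfl, fun j h1 h2 => by
      rw [List.getElem?_replicate_of_lt (by omega)]⟩
  simp at this
  exact this
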